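-- pv_equiv track=rewrite | github.com/Julesc013/dominium | tools/dist/dist_platform_matrix_common.py | _context_ids
-- ===== SOURCE A (Python) =====
-- def _token(value: object) -> str:
--     return str(value or "").strip()
--
-- def _context_ids(simulate_tty: str, simulate_gui: str) -> list[str]:
--     tty_token = _token(simulate_tty).lower() or "both"
--     gui_token = _token(simulate_gui).lower() or "both"
--     tty_values = [True] if tty_token == "yes" else [False] if tty_token == "no" else [True, False]
--     gui_values = [True] if gui_token == "yes" else [False] if gui_token == "no" else [True, False]
--     ordered: list[str] = []
--     for tty_present in tty_values:
--         for gui_present in gui_values: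
--             if tty_present:
--                 context_id = "tty"
--             elif gui_present:
--                 context_id = "gui"
--             else:
--                 context_id = "headless"
--             if context_id not in ordered:
--                 ordered.append(context_id)
--     return [context_id for context_id in ("tty", "gui", "headless") if context_id in ordered]
-- ===== SOURCE B (Python) =====
-- def _token(value: object) -> str:
--     return str(value or "").strip()
--
-- def _context_ids(simulate_tty: str, simulate_gui: str) -> list[str]:
--     tty_token = _token(simulate_tty).lower() or "both"
--     gui_token = _token(simulate_gui).lower() or "both"
--     ids: list[str] = []
--     if tty_token != "no":
--         ids.append("tty")
--     if tty_token != "yes" and gui_token != "no":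
--         ids.append("gui")
--     if tty_token != "yes" and gui_token != "yes":
--         ids.append("headless")
--     return ids
-- ===== Notes on version B (the rewrite author's own statement) =====
-- stated objective: simpler
-- what changed: Replaces the nested loop over the cartesian product of tty/gui boolean value lists plus dedup and refilter with three direct membership conditions on the tokens, appending 'tty'/'gui'/'headless' in fixed order.
import Mathlib
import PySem

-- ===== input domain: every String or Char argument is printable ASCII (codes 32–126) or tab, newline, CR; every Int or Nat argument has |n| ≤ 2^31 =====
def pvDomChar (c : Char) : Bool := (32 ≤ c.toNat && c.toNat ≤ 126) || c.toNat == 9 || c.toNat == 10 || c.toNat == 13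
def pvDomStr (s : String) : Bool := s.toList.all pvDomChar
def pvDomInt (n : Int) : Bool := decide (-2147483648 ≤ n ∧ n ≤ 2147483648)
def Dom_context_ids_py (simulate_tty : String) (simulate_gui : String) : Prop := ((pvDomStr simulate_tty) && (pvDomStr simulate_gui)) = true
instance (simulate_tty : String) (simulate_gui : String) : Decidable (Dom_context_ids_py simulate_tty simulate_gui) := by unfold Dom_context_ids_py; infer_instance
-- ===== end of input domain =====

-- B replaces A's nested loop over tty/gui boolean value lists with dedup and refilter by three direct token conditions appending "tty"/"gui"/"headless" in fixed order (objective: simpler).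


-- ===== PORT A =====
-- _token(value) = str(value or "").strip(): for a str argument this is just .strip()
def token_py (value : String) : String := PySem.Str.strip value

def context_ids_py (simulate_tty : String) (simulate_gui : String) : List String :=
  let tty_lower := PySem.Str.lower (token_py simulate_tty)
  let tty_token := if tty_lower = "" then "both" else tty_lower
  let gui_lower := PySem.Str.lower (token_py simulate_gui)
  let gui_token := if gui_lower = "" then "both" else gui_lower
  let tty_values : List Bool :=
    if tty_token = "yes" then [true] else if tty_token = "no" then [false] else [true, false]
  let gui_values : List Bool :=
    if gui_token = "yes" then [true] else if gui_token = "no" then [false] else [true, false]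
  let ordered : List String :=
    tty_values.foldl (fun ord tty_present =>
      gui_values.foldl (fun ord gui_present =>
        let context_id := if tty_present then "tty" else if gui_present then "gui" else "headless"
        if context_id ∈ ord then ord else ord ++ [context_id]) ord) []
  (["tty", "gui", "headless"]).filter (fun c => decide (c ∈ ordered))

-- ===== PORT B =====
def context_ids_py_alt (simulate_tty : String) (simulate_gui : String) : List String :=
  let tty_lower := PySem.Str.lower (token_py simulate_tty)
  let tty_token := if tty_lower = "" then "both" else tty_lower
  let gui_lower := PySem.Str.lower (token_py simulate_gui)
  let gui_token := if gui_lower = "" then "both" else gui_lower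
  let ids0 : List String := if tty_token ≠ "no" then ["tty"] else []
  let ids1 : List String := if tty_token ≠ "yes" ∧ gui_token ≠ "no" then ids0 ++ ["gui"] else ids0
  if tty_token ≠ "yes" ∧ gui_token ≠ "yes" then ids1 ++ ["headless"] else ids1

-- ===== PRECONDITION & SPEC =====
def Spec_context_ids_py (simulate_tty : String) (simulate_gui : String) (out : List String) : Prop := out = context_ids_py_alt simulate_tty simulate_gui
instance (simulate_tty : String) (simulate_gui : String) (out : List String) : Decidable (Spec_context_ids_py simulate_tty simulate_gui out) := by unfold Spec_context_ids_py; infer_instance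

-- ===== CLAIM (what is proved, stated in full; the proofs are below) =====
def Claim_equal_context_ids_py : Prop := ∀ (simulate_tty : String) (simulate_gui : String), Dom_context_ids_py simulate_tty simulate_gui → Spec_context_ids_py simulate_tty simulate_gui (context_ids_py simulate_tty simulate_gui)

-- ===== LEMMAS AND PROOFS =====

-- ===== VERDICT (by name: the statement is the Claim_ definition above) =====
-- the two bodies agree for arbitrary final tokens t g
lemma core_eq (t g : String) :
    ((["tty", "gui", "headless"] : List String).filter (fun c => decide (c ∈
      ((if t = "yes" then [true] else if t = "no" then [false] else [true, false]).foldl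
        (fun ord tty_present =>
          (if g = "yes" then [true] else if g = "no" then [false] else [true, false]).foldl
            (fun ord gui_present =>
              let context_id := if tty_present then "tty" else if gui_present then "gui" else "headless"
              if context_id ∈ ord then ord else ord ++ [context_id]) ord) ([] : List String)))))
    = (let ids0 : List String := if t ≠ "no" then ["tty"] else []
       let ids1 : List String := if t ≠ "yes" ∧ g ≠ "no" then ids0 ++ ["gui"] else ids0
       if t ≠ "yes" ∧ g ≠ "yes" then ids1 ++ ["headless"] else ids1) := by
  by_cases ht1 : t = "yes" <;> by_cases ht2 : t = "no" <;>
    by_cases hg1 : g = "yes" <;> by_cases hg2 : g = "no" <;>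
    simp [ht1, ht2, hg1, hg2, List.foldl, List.filter]

theorem context_ids_py_spec : Claim_equal_context_ids_py := by
  intro simulate_tty simulate_gui _
  unfold Spec_context_ids_py context_ids_py context_ids_py_alt
  exact core_eq _ _
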